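-- pv_equiv track=rewrite | github.com/kbaker827/boss-assistant | email_assistant_cli.py | extract_request
-- ===== SOURCE A (Python) =====
-- def extract_request(email_data):
--     """Extract the specific request from email"""
--     body = email_data.get('body', '')
--     lines = body.split('\n')
--
--     for line in lines:
--         line = line.strip()
--         if len(line) > 10 and len(line) < 200:
--             if any(word in line.lower() for word in ['can you', 'could you', 'please', 'need', 'want', 'would you']):
--                 return line
--
--     for line in lines:
--         line = line.strip()
--         if len(line) > 10:
--             return line[:200]
--
--     return body[:200]
-- ===== SOURCE B (Python) =====
-- def extract_request(email_data):
--     """Extract the specific request from email (single pass with fallback)."""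
--     body = email_data.get('body', '')
--     fallback = None
--     for raw in body.split('\n'):
--         line = raw.strip()
--         if fallback is None and len(line) > 10:
--             fallback = line
--         if 10 < len(line) < 200 and any(w in line.lower() for w in
--                 ['can you', 'could you', 'please', 'need', 'want', 'would you']):
--             return line
--     return fallback[:200] if fallback is not None else body[:200]
-- ===== Notes on version B (the rewrite author's own statement) =====
-- stated objective: simpler
-- what changed: Replaces A's two sequential scans over the split lines by a single pass that returns the first keyword line immediately while remembering the first len>10 line as a fallback.
import Mathlib
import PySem

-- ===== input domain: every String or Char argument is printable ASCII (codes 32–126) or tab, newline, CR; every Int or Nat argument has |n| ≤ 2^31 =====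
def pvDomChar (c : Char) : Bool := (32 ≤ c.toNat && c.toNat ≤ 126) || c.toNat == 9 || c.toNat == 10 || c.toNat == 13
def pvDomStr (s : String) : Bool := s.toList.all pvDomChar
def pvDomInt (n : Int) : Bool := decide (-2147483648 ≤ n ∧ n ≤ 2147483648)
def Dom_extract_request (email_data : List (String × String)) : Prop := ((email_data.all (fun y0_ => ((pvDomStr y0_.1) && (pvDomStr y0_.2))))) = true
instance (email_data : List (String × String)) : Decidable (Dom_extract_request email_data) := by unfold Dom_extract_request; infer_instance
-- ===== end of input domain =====

-- B replaces A's two sequential scans of the lines by one pass with a remembered fallback (objective: simpler).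

-- ===== PORT A =====
-- any(word in line.lower() for word in [...])
def kwAnyA (line : String) : Bool :=
  ["can you", "could you", "please", "need", "want", "would you"].any
    (fun w => PySem.Str.isIn w (PySem.Str.lower line))

-- first for-loop of A: first stripped line with 10 < len < 200 containing a keyword
def loopA1 : List String → Option String
  | [] => none
  | l :: rest =>
    let line := PySem.Str.strip l
    if PySem.Str.len line > 10 && PySem.Str.len line < 200 then
      if kwAnyA line then some line else loopA1 rest
    else loopA1 rest

-- second for-loop of A: first stripped line with len > 10, truncated to 200
def loopA2 : List String → Option String
  | [] => none
  | l :: rest =>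
    let line := PySem.Str.strip l
    if PySem.Str.len line > 10 then some (PySem.Str.slice line none (some 200))
    else loopA2 rest

def extract_request (email_data : List (String × String)) : String :=
  let body := PySem.Dict.getD (PySem.Dict.mk email_data) "body" ""
  let lines := (PySem.Str.split? body "\n").getD []  -- sep ≠ "" so split? is some; getD [] exact
  match loopA1 lines with
  | some r => r
  | none =>
    match loopA2 lines with
    | some r => r
    | none => PySem.Str.slice body none (some 200)

-- ===== PORT B =====
def kwAnyB (line : String) : Bool :=
  ["can you", "could you", "please", "need", "want", "would you"].any
    (fun w => PySem.Str.isIn w (PySem.Str.lower line))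

-- B's one pass: fallback threaded through; early return on a keyword line
def loopB (body : String) : List String → Option String → String
  | [], fallback =>
    match fallback with
    | some f => PySem.Str.slice f none (some 200)
    | none => PySem.Str.slice body none (some 200)
  | raw :: rest, fallback =>
    let line := PySem.Str.strip raw
    let fallback := if fallback.isNone && PySem.Str.len line > 10 then some line else fallback
    if 10 < PySem.Str.len line && PySem.Str.len line < 200 && kwAnyB line then line
    else loopB body rest fallback

def extract_request_alt (email_data : List (String × String)) : String :=
  let body := PySem.Dict.getD (PySem.Dict.mk email_data) "body" ""
  loopB body ((PySem.Str.split? body "\n").getD []) none  -- sep ≠ "" so split? is some; getD [] exact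

-- ===== PRECONDITION & SPEC =====
def Spec_extract_request (email_data : List (String × String)) (out : String) : Prop := out = extract_request_alt email_data
instance (email_data : List (String × String)) (out : String) : Decidable (Spec_extract_request email_data out) := by unfold Spec_extract_request; infer_instance

-- ===== CLAIM (what is proved, stated in full; the proofs are below) =====
def Claim_equal_extract_request : Prop := ∀ (email_data : List (String × String)), Dom_extract_request email_data → Spec_extract_request email_data (extract_request email_data)

-- ===== LEMMAS AND PROOFS =====

-- B's one pass, started from any fallback state, computes A's two-pass answer.
theorem loopB_eq (body : String) (lines : List String) (fb : Option String) :
    loopB body lines fb =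
      match loopA1 lines with
      | some r => r
      | none =>
        match fb with
        | some f => PySem.Str.slice f none (some 200)
        | none =>
          match loopA2 lines with
          | some r => r
          | none => PySem.Str.slice body none (some 200) := by
  induction lines generalizing fb with
  | nil => cases fb <;> simp [loopB, loopA1, loopA2]
  | cons raw rest ih =>
    by_cases h1 : 10 < (PySem.Chars.strip raw.toList).length
    · by_cases h2 : (PySem.Chars.strip raw.toList).length < 200
      · by_cases h3 : kwAnyA (PySem.Str.strip raw) = true
        · have h3' : kwAnyB (PySem.Str.strip raw) = true := h3
          simp [loopB, loopA1, h1, h2, h3, h3']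
        · have h3' : ¬ kwAnyB (PySem.Str.strip raw) = true := h3
          cases fb <;> simp [loopB, loopA1, loopA2, h1, h2, h3, h3', ih]
      · cases fb <;> simp [loopB, loopA1, loopA2, h1, h2, ih]
    · cases fb <;> simp [loopB, loopA1, loopA2, h1, ih]

-- ===== VERDICT (by name: the statement is the Claim_ definition above) =====
theorem extract_request_spec : Claim_equal_extract_request := by
  intro email_data _
  unfold Spec_extract_request extract_request extract_request_alt
  rw [loopB_eq]
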